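-- pv_equiv track=rewrite | github.com/L200170078/prak_ASD_C | MODUL-2/MODUL2-L200170078.py | jumlahHurufVokal
-- ===== SOURCE A (Python) =====
-- def jumlahHurufVokal(x):
-- 	vokal="AIUEOaiueo"
-- 	jmlhuruf=len(x)
-- 	jmlvokal=0
-- 	for karakter in x:
-- 		if karakter in vokal:
-- 			jmlvokal+=1
-- 	return (jmlhuruf, jmlvokal)
-- ===== SOURCE B (Python) =====
-- def jumlahHurufVokal(x):
-- 	jmlvokal = 0
-- 	for v in "AIUEOaiueo":
-- 		jmlvokal += x.count(v)
-- 	return (len(x), jmlvokal)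
-- ===== Notes on version B (the rewrite author's own statement) =====
-- stated objective: faster
-- what changed: Instead of one Python-level pass over x testing each character for membership in the vowel string, B loops over the ten vowels and sums x.count(v), i.e. ten C-level scans of x; the length comes from len(x).
import Mathlib
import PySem

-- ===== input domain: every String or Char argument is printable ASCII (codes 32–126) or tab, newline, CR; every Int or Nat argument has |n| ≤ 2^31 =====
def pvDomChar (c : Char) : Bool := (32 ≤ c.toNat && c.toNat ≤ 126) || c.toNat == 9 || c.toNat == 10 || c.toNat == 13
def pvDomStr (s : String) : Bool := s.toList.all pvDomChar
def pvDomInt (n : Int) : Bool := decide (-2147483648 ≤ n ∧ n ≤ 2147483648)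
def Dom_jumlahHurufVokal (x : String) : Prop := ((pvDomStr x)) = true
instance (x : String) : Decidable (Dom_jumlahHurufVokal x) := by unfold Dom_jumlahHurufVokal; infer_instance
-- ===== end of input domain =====

-- B sums x.count(v) over the fixed vowel alphabet instead of one membership-testing pass over x.

-- ===== PORT A =====
-- one pass over x, testing each character for substring membership in "AIUEOaiueo"
def jumlahHurufVokal (x : String) : Int × Int :=
  let vokal : String := "AIUEOaiueo"
  let jmlhuruf : Int := PySem.Str.len x
  let jmlvokal : Int :=
    x.toList.foldl
      (fun acc karakter =>
        if PySem.Chars.isIn [karakter] vokal.toList then acc + 1 else acc) 0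
  (jmlhuruf, jmlvokal)

-- ===== PORT B =====
-- loop over the ten vowels, summing x.count(v)
def jumlahHurufVokal_alt (x : String) : Int × Int :=
  let jmlvokal : Int :=
    "AIUEOaiueo".toList.foldl
      (fun acc v => acc + (PySem.Chars.count x.toList [v] : Int)) 0
  (PySem.Str.len x, jmlvokal)

-- ===== PRECONDITION & SPEC =====
def Spec_jumlahHurufVokal (x : String) (out : Int × Int) : Prop := out = jumlahHurufVokal_alt x
instance (x : String) (out : Int × Int) : Decidable (Spec_jumlahHurufVokal x out) := by unfold Spec_jumlahHurufVokal; infer_instance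

-- ===== CLAIM (what is proved, stated in full; the proofs are below) =====
def Claim_equal_jumlahHurufVokal : Prop := ∀ (x : String), Dom_jumlahHurufVokal x → Spec_jumlahHurufVokal x (jumlahHurufVokal x)

-- ===== LEMMAS AND PROOFS =====

-- Python's s.count(sub) for a single-character sub is the character count.
theorem count_go_singleton (c : Char) :
    ∀ (l : List Char) (fuel acc : Nat), l.length ≤ fuel →
      PySem.Chars.count.go [c] fuel l acc = acc + l.count c := by
  intro l
  induction l with
  | nil => intro fuel acc _; cases fuel <;> simp [PySem.Chars.count.go]
  | cons h t ih =>
    intro fuel acc hle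
    cases fuel with
    | zero => simp at hle
    | succ n =>
      by_cases hch : c = h
      · subst hch
        simp only [PySem.Chars.count.go, List.isPrefixOf, beq_self_eq_true,
          List.isPrefixOf_nil_left, Bool.and_true, if_true]
        rw [show List.drop [c].length (c :: t) = t by simp,
          ih n (acc + 1) (by simpa using hle)]
        simp [List.count_cons]
        omega
      · have hbe : (c == h) = false := by simp [hch]
        simp only [PySem.Chars.count.go, List.isPrefixOf, hbe, Bool.false_and,
          Bool.false_eq_true, if_false]
        rw [ih n acc (by simpa using hle)]
        simp [List.count_cons]
        exact fun hh => hch hh.symm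

theorem count_singleton (l : List Char) (c : Char) :
    PySem.Chars.count l [c] = l.count c := by
  simpa [PySem.Chars.count] using count_go_singleton c l l.length 0 le_rfl

-- 'karakter in vokal' for a single character is list membership.
theorem isIn_singleton (c : Char) (l : List Char) :
    PySem.Chars.isIn [c] l = decide (c ∈ l) := by
  by_cases h : c ∈ l
  · obtain ⟨s, t, rfl⟩ := List.append_of_mem h
    simpa [h] using (PySem.Chars.isIn_iff_infix [c] (s ++ c :: t)).2 ⟨s, t, by simp⟩
  · have hni : ¬ ([c] <:+: l) := fun hin => h (hin.mem (by simp))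
    simpa [h] using (PySem.Chars.isIn_eq_false_iff _ _).2 hni

-- counting members of (w :: ws) splits off count of w, when w ∉ ws
theorem countP_cons_alphabet (w : Char) (ws : List Char) (hw : w ∉ ws) :
    ∀ l : List Char,
      l.countP (fun c => decide (c ∈ w :: ws))
        = l.count w + l.countP (fun c => decide (c ∈ ws)) := by
  intro l
  induction l with
  | nil => simp
  | cons c t ih =>
    simp only [List.countP_cons, List.count_cons, ih]
    by_cases hcw : c = w
    · subst hcw
      have : c ∉ ws := hw
      simp [this]
      omega
    · by_cases hcm : c ∈ ws <;> simp [hcw, hcm, List.mem_cons] <;> omega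

-- sum of per-vowel character counts = count of characters that are vowels
theorem sum_counts :
    ∀ (vs : List Char), vs.Nodup →
      ∀ l : List Char,
        (vs.map (fun v => (l.count v : Int))).sum
          = (l.countP (fun c => decide (c ∈ vs)) : Int) := by
  intro vs
  induction vs with
  | nil => intro _ l; simp
  | cons w ws ih =>
    intro hnd l
    have hw : w ∉ ws := (List.nodup_cons.1 hnd).1
    have hws : ws.Nodup := (List.nodup_cons.1 hnd).2
    simp only [List.map_cons, List.sum_cons, ih hws l,
      countP_cons_alphabet w ws hw l]
    push_cast
    ring

-- ===== VERDICT (by name: the statement is the Claim_ definition above) =====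
theorem jumlahHurufVokal_spec : Claim_equal_jumlahHurufVokal := by
  intro x _
  unfold Spec_jumlahHurufVokal jumlahHurufVokal jumlahHurufVokal_alt
  simp only [PySem.List.foldl_count_if, PySem.List.foldl_add, count_singleton,
    zero_add, Prod.mk.injEq]
  refine ⟨trivial, ?_⟩
  have hpred : (fun karakter => PySem.Chars.isIn [karakter] "AIUEOaiueo".toList)
      = fun c => decide (c ∈ "AIUEOaiueo".toList) :=
    funext (fun c => isIn_singleton c _)
  rw [hpred, ← sum_counts "AIUEOaiueo".toList (by decide) x.toList]
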